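-- pv_equiv track=rewrite | github.com/baselkelziye/YTU_Bilgisayar_Muhendisligi_Arsiv | Lisansüstü/Veri Sıkıştırma/projeler/2023/kayra/compress_huff.py | compress
-- ===== SOURCE A (Python) =====
-- def compress(json_string, codes):
--     compressed_data = ""  # Sıkıştırılmış veriyi tutacak olan değişken
--     i = 0  # İndex değişkeni
--
--     # Tüm json_string boyunca dön
--     while i < len(json_string):
--         j = 1  # anahtar uzunluğunu temsil eder
--
--         # Eğer anahtar kodlarda yoksa, anahtarın uzunluğunu artır
--         while i + j <= len(json_string) and json_string[i:i + j] not in codes: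
--             j += 1
--
--         # Eğer bir anahtar bulunmuşsa
--         if i + j <= len(json_string):
--             compressed_data += codes[json_string[i:i + j]]  # Sıkıştırılmış veriye ekle
--             i += j  # İndexi anahtarın uzunluğu kadar artır
--         else:  # Eğer bu konumda geçerli bir anahtar bulunmamışsa
--             i += 1  # İndexi 1 artır
--
--     return compressed_data
-- ===== SOURCE B (Python) =====
-- def compress(json_string, codes):
--     # Precompute the set of all proper non-empty prefixes of the keys: the greedy
--     # shortest-match scan can stop as soon as the current substring is neither a
--     # key nor a prefix of a key (any longer match would make it a proper prefix).
--     prefixes = set()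
--     for k in codes:
--         for l in range(1, len(k)):
--             prefixes.add(k[:l])
--     out = []
--     n = len(json_string)
--     i = 0
--     while i < n:
--         j = 1
--         while True:
--             if i + j > n:
--                 i += 1
--                 break
--             sub = json_string[i:i + j]
--             if sub in codes:
--                 out.append(codes[sub])
--                 i += j
--                 break
--             if sub not in prefixes:
--                 i += 1
--                 break
--             j += 1
--     return "".join(out)
-- ===== Notes on version B (the rewrite author's own statement) =====
-- stated objective: faster
-- what changed: B precomputes the set of all proper prefixes of the keys so the inner scan stops at the first substring that is neither a key nor a key prefix (instead of scanning to the end of the string), and collects output pieces in a list joined once instead of repeated string concatenation.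
import Mathlib
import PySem

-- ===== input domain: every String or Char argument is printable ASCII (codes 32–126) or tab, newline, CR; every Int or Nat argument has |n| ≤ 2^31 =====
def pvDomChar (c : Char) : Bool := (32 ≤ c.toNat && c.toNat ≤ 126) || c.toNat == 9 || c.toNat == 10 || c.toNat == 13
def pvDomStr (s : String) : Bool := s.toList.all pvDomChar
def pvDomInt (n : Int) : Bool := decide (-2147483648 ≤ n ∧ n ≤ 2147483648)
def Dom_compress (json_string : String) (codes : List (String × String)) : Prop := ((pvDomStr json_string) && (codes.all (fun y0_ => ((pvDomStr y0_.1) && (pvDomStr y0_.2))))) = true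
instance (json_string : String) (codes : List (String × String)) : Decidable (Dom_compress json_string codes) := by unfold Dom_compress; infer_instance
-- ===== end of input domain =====

-- B replaces A's unbounded inner scan by a key-prefix-set test that stops the scan early,
-- and joins the output pieces once instead of repeated string concatenation.

-- ===== PORT A =====
-- the Python 'codes' parameter is a dict; both ports receive it as an association list and
-- rebuild the dict (PySem.Dict.ofList = Python dict(pairs)), keyed on List Char
def pvDict (codes : List (String × String)) : PySem.Dict (List Char) (List Char) :=
  PySem.Dict.ofList (codes.map (fun p => (p.1.toList, p.2.toList)))

-- A's inner while loop: raise j while i+j <= len and json_string[i:i+j] not in codes.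
-- json_string[i:i+j] with natural i, j is exactly (drop i).take j (nonnegative slice, clamped like Python).
def findJ (cs : List Char) (d : PySem.Dict (List Char) (List Char)) (i j : Nat) : Nat :=
  if i + j ≤ cs.length ∧ d.contains ((cs.drop i).take j) = false then
    findJ cs d i (j + 1)
  else j
termination_by cs.length + 1 - (i + j)
decreasing_by omega

-- needed by loopA's termination proof (cited in its decreasing_by)
theorem le_findJ (cs : List Char) (d : PySem.Dict (List Char) (List Char)) (i j : Nat) :
    j ≤ findJ cs d i j := by
  rw [findJ]
  split
  · have := le_findJ cs d i (j + 1); omega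
  · omega
termination_by cs.length + 1 - (i + j)
decreasing_by omega

-- A's outer while loop, accumulating compressed_data (as List Char); A's local j is inlined
def loopA (cs : List Char) (d : PySem.Dict (List Char) (List Char)) (acc : List Char) (i : Nat) :
    List Char :=
  if _h : i < cs.length then
    if i + findJ cs d i 1 ≤ cs.length then
      loopA cs d (acc ++ d.getD ((cs.drop i).take (findJ cs d i 1)) []) (i + findJ cs d i 1)
    else
      loopA cs d acc (i + 1)
  else acc
termination_by cs.length - i
decreasing_by
  · have := le_findJ cs d i 1; omega
  · omega

def compress (json_string : String) (codes : List (String × String)) : String :=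
  String.ofList (loopA json_string.toList (pvDict codes) [] 0)

-- ===== PORT B =====
-- B's prefix set: for k in codes: for l in range(1, len(k)): prefixes.add(k[:l])
-- (range(1, len k) over Nat is List.range' 1 (len k - 1); k[:l] with natural l is take l)
def pvPrefixes (d : PySem.Dict (List Char) (List Char)) : PySem.Set (List Char) :=
  d.keys.foldl
    (fun s k => (List.range' 1 (k.length - 1)).foldl (fun s l => PySem.Set.add s (k.take l)) s)
    PySem.Set.empty

-- B's inner 'while True' loop: some (code, j) = the break that found a key,
-- none = the breaks doing i += 1; B's local sub is inlined
def innerB (cs : List Char) (d : PySem.Dict (List Char) (List Char)) (P : PySem.Set (List Char))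
    (i j : Nat) : Option (List Char × Nat) :=
  if cs.length < i + j then none
  else if d.contains ((cs.drop i).take j) then
    some (d.getD ((cs.drop i).take j) [], j)
  else if PySem.Set.contains P ((cs.drop i).take j) then innerB cs d P i (j + 1)
  else none
termination_by cs.length + 1 - (i + j)
decreasing_by omega

-- needed by loopB's termination proof (cited in its decreasing_by)
theorem innerB_some_le (cs : List Char) (d : PySem.Dict (List Char) (List Char))
    (P : PySem.Set (List Char)) (i j : Nat) (c : List Char) (l : Nat)
    (h : innerB cs d P i j = some (c, l)) : j ≤ l := by
  rw [innerB] at h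
  split at h
  · exact absurd h (by simp)
  · split at h
    · simp at h; omega
    · split at h
      · have := innerB_some_le cs d P i (j + 1) c l h; omega
      · exact absurd h (by simp)
termination_by cs.length + 1 - (i + j)
decreasing_by omega

-- B's outer while loop, accumulating the list of output pieces
def loopB (cs : List Char) (d : PySem.Dict (List Char) (List Char)) (P : PySem.Set (List Char))
    (out : List (List Char)) (i : Nat) : List (List Char) :=
  if _h : i < cs.length then
    match hm : innerB cs d P i 1 with
    | some (c, j) => loopB cs d P (out ++ [c]) (i + j)
    | none => loopB cs d P out (i + 1)
  else out
termination_by cs.length - i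
decreasing_by
  · have := innerB_some_le cs d P i 1 c j hm; omega
  · omega

def compress_alt (json_string : String) (codes : List (String × String)) : String :=
  let d := pvDict codes
  String.ofList (loopB json_string.toList d (pvPrefixes d) [] 0).flatten  -- "".join(out)

-- ===== PRECONDITION & SPEC =====
def Spec_compress (json_string : String) (codes : List (String × String)) (out : String) : Prop := out = compress_alt json_string codes
instance (json_string : String) (codes : List (String × String)) (out : String) : Decidable (Spec_compress json_string codes out) := by unfold Spec_compress; infer_instance

-- ===== CLAIM (what is proved, stated in full; the proofs are below) =====
def Claim_equal_compress : Prop := ∀ (json_string : String) (codes : List (String × String)), Dom_compress json_string codes → Spec_compress json_string codes (compress json_string codes)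

-- ===== LEMMAS AND PROOFS =====

-- equation lemmas for findJ's two cases
theorem findJ_rec (cs : List Char) (d : PySem.Dict (List Char) (List Char)) (i j : Nat)
    (hc : i + j ≤ cs.length ∧ d.contains ((cs.drop i).take j) = false) :
    findJ cs d i j = findJ cs d i (j + 1) := by
  rw [findJ, if_pos hc]

theorem findJ_stop (cs : List Char) (d : PySem.Dict (List Char) (List Char)) (i j : Nat)
    (hc : ¬(i + j ≤ cs.length ∧ d.contains ((cs.drop i).take j) = false)) :
    findJ cs d i j = j := by
  rw [findJ, if_neg hc]

-- membership is preserved by the prefix-collecting foldl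
theorem mem_prefix_foldl_mono (L : List (List Char)) :
    ∀ (s : PySem.Set (List Char)) (y : List Char), y ∈ s →
      y ∈ L.foldl
        (fun s k => (List.range' 1 (k.length - 1)).foldl (fun s l => PySem.Set.add s (k.take l)) s)
        s := by
  induction L with
  | nil => intro s y hy; exact hy
  | cons k L ih =>
    intro s y hy
    apply ih
    rw [PySem.Set.mem_foldl_add]
    exact Or.inl hy

-- every proper non-empty prefix of a processed key lands in the set
theorem take_mem_prefix_foldl (L : List (List Char)) :
    ∀ (s : PySem.Set (List Char)) (k : List Char), k ∈ L → ∀ l : Nat, 1 ≤ l → l < k.length →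
      k.take l ∈ L.foldl
        (fun s k => (List.range' 1 (k.length - 1)).foldl (fun s l => PySem.Set.add s (k.take l)) s)
        s := by
  induction L with
  | nil => intro _ _ hk; cases hk
  | cons k' L ih =>
    intro s k hk l hl1 hl2
    rw [List.foldl_cons]
    rcases List.mem_cons.mp hk with hk | hk
    · subst hk
      apply mem_prefix_foldl_mono
      rw [PySem.Set.mem_foldl_add]
      refine Or.inr ⟨l, ?_, rfl⟩
      rw [List.mem_range'_1]
      omega
    · exact ih _ k hk l hl1 hl2

theorem P_closed (d : PySem.Dict (List Char) (List Char)) (k : List Char)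
    (hk : d.contains k = true) (l : Nat) (hl1 : 1 ≤ l) (hl2 : l < k.length) :
    PySem.Set.contains (pvPrefixes d) (k.take l) = true := by
  rw [PySem.Set.contains_iff]
  exact take_mem_prefix_foldl d.keys PySem.Set.empty k
    ((PySem.Dict.contains_iff_mem_keys d k).mp hk) l hl1 hl2

-- where findJ stops inside the string, the substring is a key
theorem findJ_spec (cs : List Char) (d : PySem.Dict (List Char) (List Char)) (i j : Nat)
    (h : i + findJ cs d i j ≤ cs.length) :
    d.contains ((cs.drop i).take (findJ cs d i j)) = true := by
  by_cases hc : i + j ≤ cs.length ∧ d.contains ((cs.drop i).take j) = false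
  · rw [findJ_rec cs d i j hc] at h ⊢
    exact findJ_spec cs d i (j + 1) h
  · rw [findJ_stop cs d i j hc] at h ⊢
    by_cases hb : d.contains ((cs.drop i).take j) = true
    · exact hb
    · exact absurd ⟨h, Bool.eq_false_iff.mpr hb⟩ hc
termination_by cs.length + 1 - (i + j)
decreasing_by omega

-- the key lemma: B's inner loop computes exactly A's inner scan result (for j ≥ 1)
theorem inner_eq (cs : List Char) (d : PySem.Dict (List Char) (List Char)) (i j : Nat)
    (hj : 1 ≤ j) :
    innerB cs d (pvPrefixes d) i j =
      if i + findJ cs d i j ≤ cs.length then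
        some (d.getD ((cs.drop i).take (findJ cs d i j)) [], findJ cs d i j)
      else none := by
  rw [innerB]
  by_cases h1 : i + j ≤ cs.length
  · rw [if_neg (by omega)]
    by_cases h2 : d.contains ((cs.drop i).take j) = true
    · rw [if_pos h2, findJ_stop cs d i j (by simp [h2]), if_pos h1]
    · have h2' : d.contains ((cs.drop i).take j) = false := Bool.eq_false_iff.mpr h2
      rw [if_neg h2, findJ_rec cs d i j ⟨h1, h2'⟩]
      by_cases h3 : PySem.Set.contains (pvPrefixes d) ((cs.drop i).take j) = true
      · rw [if_pos h3]
        exact inner_eq cs d i (j + 1) (by omega)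
      · rw [if_neg h3]
        -- the bail case: no longer substring can be a key either (its j-prefix would be in the set)
        split
        · rename_i hle
          exfalso
          have hjl : j + 1 ≤ findJ cs d i (j + 1) := le_findJ cs d i (j + 1)
          have hkey : d.contains ((cs.drop i).take (findJ cs d i (j + 1))) = true :=
            findJ_spec cs d i (j + 1) hle
          have htake : ((cs.drop i).take (findJ cs d i (j + 1))).take j = (cs.drop i).take j := by
            rw [List.take_take]
            congr 1
            omega
          have hlen : ((cs.drop i).take (findJ cs d i (j + 1))).length = findJ cs d i (j + 1) := by
            rw [List.length_take, List.length_drop]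
            omega
          have hP := P_closed d ((cs.drop i).take (findJ cs d i (j + 1))) hkey j hj (by omega)
          rw [htake] at hP
          exact h3 hP
        · rfl
  · rw [if_pos (by omega), findJ_stop cs d i j (fun hc => h1 hc.1), if_neg h1]
termination_by cs.length + 1 - (i + j)
decreasing_by omega

-- accumulator lemmas
theorem loopA_acc (cs : List Char) (d : PySem.Dict (List Char) (List Char)) (i : Nat)
    (acc : List Char) : loopA cs d acc i = acc ++ loopA cs d [] i := by
  conv_lhs => rw [loopA]
  conv_rhs => rw [loopA]
  split
  · split
    · rw [loopA_acc cs d _ (acc ++ _), loopA_acc cs d _ ([] ++ _)]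
      simp
    · exact loopA_acc cs d _ acc
  · simp
termination_by cs.length - i
decreasing_by all_goals (have := le_findJ cs d i 1; omega)

theorem loopB_acc (cs : List Char) (d : PySem.Dict (List Char) (List Char))
    (P : PySem.Set (List Char)) (i : Nat) (out : List (List Char)) :
    loopB cs d P out i = out ++ loopB cs d P [] i := by
  conv_lhs => rw [loopB]
  conv_rhs => rw [loopB]
  split
  · split
    · rename_i c j hm
      rw [loopB_acc cs d P _ (out ++ [c]), loopB_acc cs d P _ ([] ++ [c])]
      simp
    · exact loopB_acc cs d P _ out
  · simp
termination_by cs.length - i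
decreasing_by all_goals first
  | (have := innerB_some_le cs d P i 1 _ _ (by assumption); omega)
  | omega

-- the two outer loops agree
theorem loop_eq (cs : List Char) (d : PySem.Dict (List Char) (List Char)) (i : Nat) :
    loopA cs d [] i = (loopB cs d (pvPrefixes d) [] i).flatten := by
  have hinner := inner_eq cs d i 1 (le_refl 1)
  conv_lhs => rw [loopA]
  conv_rhs => rw [loopB]
  by_cases hlt : i < cs.length
  · rw [dif_pos hlt, dif_pos hlt]
    by_cases hle : i + findJ cs d i 1 ≤ cs.length
    · rw [if_pos hle] at hinner ⊢
      split
      · rename_i c j hm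
        rw [hinner, Option.some.injEq, Prod.mk.injEq] at hm
        rw [loopA_acc, loopB_acc, loop_eq cs d (i + findJ cs d i 1), hm.1, hm.2]
        simp
      · rename_i hm
        rw [hinner] at hm
        exact absurd hm (by simp)
    · rw [if_neg hle] at hinner ⊢
      split
      · rename_i c j hm
        rw [hinner] at hm
        exact absurd hm (by simp)
      · exact loop_eq cs d (i + 1)
  · rw [dif_neg hlt, dif_neg hlt]
    rfl
termination_by cs.length - i
decreasing_by all_goals (have := le_findJ cs d i 1; omega)

-- ===== VERDICT (by name: the statement is the Claim_ definition above) =====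
theorem compress_spec : Claim_equal_compress := by
  intro json_string codes _
  unfold Spec_compress compress compress_alt
  rw [loop_eq]
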